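-- pv_equiv track=rewrite | github.com/maxiarat1/albion_helper | app/data/dump_manager.py | _unescape_copy_value
-- ===== SOURCE A (Python) =====
-- def _unescape_copy_value(value: str) -> str | None:
--     if value == r"\N":
--         return None
--
--     result = []
--     i = 0
--     while i < len(value):
--         char = value[i]
--         if char == "\\" and i + 1 < len(value):
--             nxt = value[i + 1]
--             if nxt == "t":
--                 result.append("\t")
--             elif nxt == "n":
--                 result.append("\n")
--             elif nxt == "r":
--                 result.append("\r")
--             elif nxt == "\\":
--                 result.append("\\")
--             else:
--                 result.append(nxt)
--             i += 2
--         else: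
--             result.append(char)
--             i += 1
--
--     return "".join(result)
-- ===== SOURCE B (Python) =====
-- import re
--
-- _ESCAPES = {"t": "\t", "n": "\n", "r": "\r", "\\": "\\"}
--
--
-- def _unescape_copy_value(value: str) -> str | None:
--     if value == r"\N":
--         return None
--     return re.sub(
--         r"\\(.)",
--         lambda m: _ESCAPES.get(m.group(1), m.group(1)),
--         value,
--         flags=re.DOTALL,
--     )
-- ===== Notes on version B (the rewrite author's own statement) =====
-- stated objective: idiomatic
-- what changed: Replaces the hand-written index loop with explicit i+=1/i+=2 stepping and an if/elif chain by a single re.sub over the pattern \\(.) with DOTALL and an escape-mapping dict, leaving a trailing lone backslash unmatched just like the original.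
import Mathlib
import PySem

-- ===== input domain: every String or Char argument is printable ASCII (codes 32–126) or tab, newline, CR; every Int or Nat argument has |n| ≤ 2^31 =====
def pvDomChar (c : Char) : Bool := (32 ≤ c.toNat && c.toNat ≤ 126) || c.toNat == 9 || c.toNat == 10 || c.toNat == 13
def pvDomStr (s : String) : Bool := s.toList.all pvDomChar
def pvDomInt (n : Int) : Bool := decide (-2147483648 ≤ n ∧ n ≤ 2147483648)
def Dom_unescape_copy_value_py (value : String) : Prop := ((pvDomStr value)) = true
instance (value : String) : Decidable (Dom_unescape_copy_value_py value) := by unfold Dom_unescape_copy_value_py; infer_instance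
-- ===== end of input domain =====

-- B replaces A's index-driven while loop and if/elif chain by a regex substitution
-- over an escape-mapping table (idiomatic; same cost).

-- ===== PORT A =====
-- A's while loop: index i advances by 2 after an escape, by 1 otherwise; result list is accumulated.
def pvALoop (cs : List Char) (i : Nat) (result : List Char) : List Char :=
  if _h : i < cs.length then
    let char := cs[i]!
    if char = '\\' ∧ i + 1 < cs.length then
      let nxt := cs[i + 1]!
      let out :=
        if nxt = 't' then '\t'
        else if nxt = 'n' then '\n'
        else if nxt = 'r' then '\r'
        else if nxt = '\\' then '\\'
        else nxt
      pvALoop cs (i + 2) (out :: result)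
    else
      pvALoop cs (i + 1) (char :: result)
  else
    result
termination_by cs.length - i

def unescape_copy_value_py (value : String) : Option String :=
  if value = "\\N" then none
  else some (String.ofList (pvALoop value.toList 0 []).reverse)

-- ===== PORT B =====
-- the mapping dict {'t':'\t','n':'\n','r':'\r','\\':'\\'}
def pvEscapes : PySem.Dict Char Char :=
  PySem.Dict.ofList [('t', '\t'), ('n', '\n'), ('r', '\r'), ('\\', '\\')]

-- re.sub(r'\\(.)', lambda m: mapping.get(g1, g1), value, DOTALL): scan left-to-right,
-- each non-overlapping match '\' + c is replaced via the mapping, other chars are copied.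
def pvBSub : List Char → List Char
  | '\\' :: c :: rest => (pvEscapes.getD c c) :: pvBSub rest
  | c :: rest => c :: pvBSub rest
  | [] => []

def unescape_copy_value_py_alt (value : String) : Option String :=
  if value = "\\N" then none
  else some (String.ofList (pvBSub value.toList))

-- ===== PRECONDITION & SPEC =====
def Spec_unescape_copy_value_py (value : String) (out : Option String) : Prop := out = unescape_copy_value_py_alt value
instance (value : String) (out : Option String) : Decidable (Spec_unescape_copy_value_py value out) := by unfold Spec_unescape_copy_value_py; infer_instance

-- ===== CLAIM (what is proved, stated in full; the proofs are below) =====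
def Claim_equal_unescape_copy_value_py : Prop := ∀ (value : String), Dom_unescape_copy_value_py value → Spec_unescape_copy_value_py value (unescape_copy_value_py value)

-- ===== LEMMAS AND PROOFS =====

-- B's mapping lookup computes exactly A's if/elif chain on the escaped character.
theorem pvMap_eq (c : Char) :
    (if c = 't' then '\t'
     else if c = 'n' then '\n'
     else if c = 'r' then '\r'
     else if c = '\\' then '\\'
     else c) = pvEscapes.getD c c := by
  by_cases h3 : c = 't' <;> by_cases h4 : c = 'n' <;> by_cases h5 : c = 'r' <;>
    by_cases h6 : c = '\\' <;> subst_eqs <;>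
    first
    | decide
    | (rw [show pvEscapes = PySem.Dict.mk [('t', '\t'), ('n', '\n'), ('r', '\r'), ('\\', '\\')] from by decide]
       simp [PySem.Dict.getD, PySem.Dict.get?, beq_iff_eq,
         h3, h4, h5, h6, Ne.symm h3, Ne.symm h4, Ne.symm h5, Ne.symm h6])

theorem pvBSub_cons_of_ne (c : Char) (rest : List Char) (hc : ¬ c = '\\') :
    pvBSub (c :: rest) = c :: pvBSub rest := by
  cases rest <;> (rw [pvBSub.eq_def]; split <;> simp_all)

-- A's loop from index i equals the accumulator plus (reversed) B's scan of the remaining suffix.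
theorem pvALoop_eq_bsub (n : Nat) : ∀ (cs : List Char) (i : Nat) (result : List Char),
    cs.length - i ≤ n → pvALoop cs i result = (pvBSub (cs.drop i)).reverse ++ result := by
  induction n with
  | zero =>
    intro cs i result hn
    rw [pvALoop]
    have h : ¬ i < cs.length := by omega
    rw [dif_neg h, List.drop_eq_nil_of_le (by omega)]
    simp [pvBSub]
  | succ n ih =>
    intro cs i result hn
    rw [pvALoop]
    by_cases h : i < cs.length
    · rw [dif_pos h]
      by_cases hesc : cs[i]! = '\\' ∧ i + 1 < cs.length
      · rw [if_pos hesc]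
        obtain ⟨hc, hlt⟩ := hesc
        rw [ih cs (i + 2) _ (by omega)]
        have h1 : cs.drop i = '\\' :: cs[i + 1]! :: cs.drop (i + 2) := by
          rw [List.drop_eq_getElem_cons h, List.drop_eq_getElem_cons hlt,
              ← getElem!_pos cs i h, ← getElem!_pos cs (i + 1) hlt, hc]
        rw [h1, pvBSub, pvMap_eq]
        simp
      · rw [if_neg hesc]
        rw [ih cs (i + 1) _ (by omega)]
        have h1 : cs.drop i = cs[i]! :: cs.drop (i + 1) := by
          rw [List.drop_eq_getElem_cons h, getElem!_pos cs i h]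
        rw [h1]
        rcases Classical.em (cs[i]! = '\\') with hc | hc
        · have hge : ¬ i + 1 < cs.length := fun hlt => hesc ⟨hc, hlt⟩
          rw [List.drop_eq_nil_of_le (by omega), hc]
          simp [pvBSub]
        · rw [pvBSub_cons_of_ne _ _ hc]
          simp
    · rw [dif_neg h, List.drop_eq_nil_of_le (by omega)]
      simp [pvBSub]

-- ===== VERDICT (by name: the statement is the Claim_ definition above) =====
theorem unescape_copy_value_py_spec : Claim_equal_unescape_copy_value_py := by
  intro value _
  unfold Spec_unescape_copy_value_py unescape_copy_value_py unescape_copy_value_py_alt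
  split
  · rfl
  · rw [pvALoop_eq_bsub (value.toList.length) value.toList 0 [] (by omega)]
    simp
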